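-- pv_equiv track=rewrite | github.com/Vitor-Garcia-Comissoli/Codes_from_MAC0122 | MAC 0122/Exercícios/Lista sem Repetição de Palavras/lista_sem_rep_pal.py | dedup_list_sort
-- ===== SOURCE A (Python) =====
-- import bisect
--
-- def dedup_list_sort(v, e, d):
--     '''(list) -> list
--     RECEBE uma lista `v` e inteiros `e` e `d`.
--     RETORNA uma lista crescente e sem repetições dos itens em `v[e:d]`.
--     '''
--     lst = []
--     for i in range(e, d):
--         item = v[i]
--         # encontre posição onde item está ou deve ser inserido
--         # busca binária
--         j = bisect.bisect_left(lst, item, lo=0, hi=len(lst))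
--         # se o item não está na lista, ele é inserido
--         if j >= len(lst) or lst[j] != item:
--             lst.insert(j, item)
--     return lst
-- ===== SOURCE B (Python) =====
-- def dedup_list_sort(v, e, d):
--     '''(list) -> list
--     Sort the selected elements up front, then remove adjacent duplicates
--     in one linear pass (instead of per-element binary search + insert).
--     '''
--     tmp = sorted(v[i] for i in range(e, d))
--     out = []
--     for x in tmp:
--         if not out or x != out[-1]:
--             out.append(x)
--     return out
-- ===== Notes on version B (the rewrite author's own statement) =====
-- stated objective: alternative
-- what changed: Replaces A's incremental binary-search-and-insert construction with a single up-front sort followed by one linear adjacent-duplicate removal pass.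
import Mathlib
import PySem

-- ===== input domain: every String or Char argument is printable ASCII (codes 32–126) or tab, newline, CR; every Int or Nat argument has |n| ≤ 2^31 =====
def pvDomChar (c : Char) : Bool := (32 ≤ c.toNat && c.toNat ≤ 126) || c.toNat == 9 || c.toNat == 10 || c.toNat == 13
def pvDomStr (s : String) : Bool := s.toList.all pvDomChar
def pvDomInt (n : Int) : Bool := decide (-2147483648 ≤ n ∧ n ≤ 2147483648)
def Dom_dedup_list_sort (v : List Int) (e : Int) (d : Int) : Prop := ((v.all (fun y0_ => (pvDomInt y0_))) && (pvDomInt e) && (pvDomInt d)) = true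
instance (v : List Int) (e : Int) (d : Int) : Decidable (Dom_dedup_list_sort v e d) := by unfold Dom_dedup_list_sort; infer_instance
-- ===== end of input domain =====

-- B replaces A's binary-search-and-insert construction with one up-front sort followed by a linear adjacent-duplicate removal pass.


-- ===== PORT A =====
-- loop body of A: binary-search the insertion point, insert if absent
def aStep (lst : List Int) (item : Int) : List Int :=
  let j := PySem.List.bisectLeft lst item
  if lst.length ≤ j ∨ lst.getD j 0 ≠ item then PySem.List.insert lst (j : Int) item else lst

def dedup_list_sort (v : List Int) (e : Int) (d : Int) : List Int :=
  (PySem.List.pyRange e d 1).foldl (fun lst i => aStep lst (PySem.List.pyGetD v i 0)) []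

-- ===== PORT B =====
-- loop body of B: append unless equal to the last kept element
def bStep (out : List Int) (x : Int) : List Int :=
  if out = [] ∨ out.getLast? ≠ some x then out ++ [x] else out

def dedup_list_sort_alt (v : List Int) (e : Int) (d : Int) : List Int :=
  let tmp := PySem.List.sorted ((PySem.List.pyRange e d 1).map (fun i => PySem.List.pyGetD v i 0)) (fun x => x)
  tmp.foldl bStep []

-- ===== PRECONDITION & SPEC =====
-- Pre_ excludes exactly the inputs where A raises IndexError: a nonempty range(e,d) reaching an index outside [-len(v), len(v)).
def Pre_dedup_list_sort (v : List Int) (e : Int) (d : Int) : Prop :=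
  e < d → (-(v.length : Int) ≤ e ∧ d ≤ (v.length : Int))
instance (v : List Int) (e : Int) (d : Int) : Decidable (Pre_dedup_list_sort v e d) := by unfold Pre_dedup_list_sort; infer_instance
def pvWitness_dedup_list_sort : List Int × Int × Int := ([2, 5, 2, -1, 5], 0, 5)

def Spec_dedup_list_sort (v : List Int) (e : Int) (d : Int) (out : List Int) : Prop := out = dedup_list_sort_alt v e d
instance (v : List Int) (e : Int) (d : Int) (out : List Int) : Decidable (Spec_dedup_list_sort v e d out) := by unfold Spec_dedup_list_sort; infer_instance

-- ===== CLAIM (what is proved, stated in full; the proofs are below) =====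
def Claim_equal_dedup_list_sort : Prop := ∀ (v : List Int) (e : Int) (d : Int), Dom_dedup_list_sort v e d → Pre_dedup_list_sort v e d → Spec_dedup_list_sort v e d (dedup_list_sort v e d)

-- ===== LEMMAS AND PROOFS =====

-- a strictly increasing list bounds all its members by its last element
theorem le_getLast_of_pairwise_lt (l : List Int) (a : Int) (ha : a ∈ l)
    (hp : l.Pairwise (· < ·)) (x : Int) (hx : l.getLast? = some x) : a ≤ x := by
  obtain ⟨l', rfl⟩ := List.getLast?_eq_some_iff.mp hx
  rw [List.pairwise_append] at hp
  rcases List.mem_append.mp ha with h | h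
  · exact le_of_lt (hp.2.2 a h x (by simp))
  · simp at h; omega

-- A's step: preserves strict sortedness and adds item to the member set
theorem aStep_pairwise (lst : List Int) (item : Int) (hp : lst.Pairwise (· < ·)) :
    (aStep lst item).Pairwise (· < ·) ∧ (∀ y, y ∈ aStep lst item ↔ y ∈ lst ∨ y = item) := by
  have hple : lst.Pairwise (· ≤ ·) := hp.imp (fun h => le_of_lt h)
  obtain ⟨hjle, hlo, hhi⟩ := PySem.List.bisectLeft_spec lst item hple
  set j := PySem.List.bisectLeft lst item with hj
  unfold aStep
  rw [← hj]
  by_cases hc : lst.length ≤ j ∨ lst.getD j 0 ≠ item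
  · rw [if_pos hc, PySem.List.insert_natCast lst j item hjle]
    have hlt : ∀ y ∈ lst.drop j, item < y := by
      intro y hy
      obtain ⟨k, hk, rfl⟩ := List.getElem_of_mem hy
      rw [List.getElem_drop]
      have hjk : j ≤ j + k := by omega
      have hlen : j + k < lst.length := by
        have := List.length_drop (l := lst) (i := j); omega
      have hge := hhi (j + k) hlen hjk
      rcases Nat.lt_or_ge j lst.length with hjlt | hjge
      · -- j < length: the branch says lst[j] ≠ item, so lst[j] > item, and lst[j+k] ≥ lst[j]
        have hne : lst.getD j 0 ≠ item := by
          rcases hc with h | h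
          · omega
          · exact h
        have hjget : lst.getD j 0 = lst[j] := List.getD_eq_getElem lst 0 hjlt
        have hjgt : item < lst[j] := lt_of_le_of_ne (hhi j hjlt le_rfl) (by rw [hjget] at hne; exact fun h => hne h.symm)
        rcases Nat.eq_or_lt_of_le hjk with heq | hlt2
        · simp only [← heq]; omega
        · have := List.pairwise_iff_getElem.mp hp j (j + k) hjlt hlen hlt2
          omega
      · omega
    have hlo' : ∀ y ∈ lst.take j, y < item := by
      intro y hy
      obtain ⟨k, hk, rfl⟩ := List.getElem_of_mem hy
      have hkj : k < j := by simp [List.length_take] at hk; omega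
      rw [List.getElem_take]
      exact hlo k (by omega) hkj
    constructor
    · rw [List.pairwise_append]
      refine ⟨hp.sublist (List.take_sublist _ _), ?_, ?_⟩
      · rw [List.pairwise_cons]
        exact ⟨fun y hy => hlt y hy, hp.sublist (List.drop_sublist _ _)⟩
      · intro a ha b hb
        rcases hb with _ | ⟨_, hb⟩
        · exact hlo' a ha
        · exact lt_trans (hlo' a ha) (hlt _ hb)
    · intro y
      constructor
      · intro hy
        rw [List.mem_append, List.mem_cons] at hy
        rcases hy with h | h | h
        · exact Or.inl (List.mem_of_mem_take h)
        · exact Or.inr h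
        · exact Or.inl (List.mem_of_mem_drop h)
      · intro hy
        rw [List.mem_append, List.mem_cons]
        rcases hy with h | h
        · rw [← List.take_append_drop j lst, List.mem_append] at h
          rcases h with h2 | h2
          · exact Or.inl h2
          · exact Or.inr (Or.inr h2)
        · exact Or.inr (Or.inl h)
  · rw [if_neg hc]
    push Not at hc
    obtain ⟨hjlt, hjeq⟩ := hc
    have hjlt' : j < lst.length := by omega
    refine ⟨hp, fun y => ⟨Or.inl, fun hy => ?_⟩⟩
    rcases hy with h | rfl
    · exact h
    · rw [List.getD_eq_getElem lst 0 hjlt'] at hjeq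
      exact hjeq ▸ List.getElem_mem hjlt'

-- A's loop: strict sortedness invariant + member-set characterisation
theorem foldl_aStep_invariant (xs : List Int) (lst : List Int) (hp : lst.Pairwise (· < ·)) :
    (xs.foldl aStep lst).Pairwise (· < ·) ∧
    (∀ y, y ∈ xs.foldl aStep lst ↔ y ∈ lst ∨ y ∈ xs) := by
  induction xs generalizing lst with
  | nil => simpa using hp
  | cons x t ih =>
    obtain ⟨hsp, hsm⟩ := aStep_pairwise lst x hp
    obtain ⟨hp', hm'⟩ := ih (aStep lst x) hsp
    refine ⟨hp', fun y => ?_⟩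
    rw [List.foldl_cons, hm' y, hsm y, List.mem_cons]
    tauto

-- B's loop: from a (≤)-sorted input, a strictly sorted output with the same member set
theorem foldl_bStep_invariant (tmp : List Int) (out : List Int)
    (hout : out.Pairwise (· < ·))
    (hsep : ∀ a ∈ out, ∀ b ∈ tmp, a ≤ b)
    (htmp : tmp.Pairwise (· ≤ ·)) :
    (tmp.foldl bStep out).Pairwise (· < ·) ∧
    (∀ y, y ∈ tmp.foldl bStep out ↔ y ∈ out ∨ y ∈ tmp) := by
  induction tmp generalizing out with
  | nil => simpa using hout
  | cons x t ih =>
    rw [List.pairwise_cons] at htmp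
    obtain ⟨hxle, htp⟩ := htmp
    rw [List.foldl_cons]
    by_cases hc : out = [] ∨ out.getLast? ≠ some x
    · have hbs : bStep out x = out ++ [x] := by unfold bStep; rw [if_pos hc]
      rw [hbs]
      have hlt : ∀ a ∈ out, a < x := by
        intro a ha
        have hle : a ≤ x := hsep a ha x (by simp)
        rcases hc with h | h
        · subst h; cases ha
        · rcases lt_or_eq_of_le hle with hlt | heq
          · exact hlt
          · exfalso
            obtain ⟨l, hl⟩ := Option.isSome_iff_exists.mp (List.getLast?_isSome.mpr (List.ne_nil_of_mem ha))
            obtain ⟨pre, hpre⟩ := List.getLast?_eq_some_iff.mp hl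
            have hal : a ≤ l := le_getLast_of_pairwise_lt out a ha hout l hl
            have hlmem : l ∈ out := by rw [hpre]; simp
            have hlx : l ≤ x := hsep l hlmem x (by simp)
            have : l = x := by omega
            exact h (this ▸ hl)
      have hp2 : (out ++ [x]).Pairwise (· < ·) := by
        rw [List.pairwise_append]
        exact ⟨hout, by simp, by intro a ha b hb; simp at hb; exact hb ▸ hlt a ha⟩
      have hsep2 : ∀ a ∈ out ++ [x], ∀ b ∈ t, a ≤ b := by
        intro a ha b hb
        rw [List.mem_append, List.mem_singleton] at ha
        rcases ha with h | rfl
        · exact hsep a h b (List.mem_cons_of_mem _ hb)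
        · exact hxle b hb
      obtain ⟨hp', hm'⟩ := ih (out ++ [x]) hp2 hsep2 htp
      refine ⟨hp', fun y => ?_⟩
      rw [hm' y]; simp; tauto
    · have hbs : bStep out x = out := by unfold bStep; rw [if_neg hc]
      rw [hbs]
      push Not at hc
      obtain ⟨pre, hpre⟩ := List.getLast?_eq_some_iff.mp hc.2
      have hxmem : x ∈ out := by rw [hpre]; simp
      have hsep2 : ∀ a ∈ out, ∀ b ∈ t, a ≤ b := fun a ha b hb => hsep a ha b (List.mem_cons_of_mem _ hb)
      obtain ⟨hp', hm'⟩ := ih out hout hsep2 htp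
      refine ⟨hp', fun y => ?_⟩
      rw [hm' y]; simp
      constructor
      · tauto
      · rintro (h | rfl | h)
        · exact Or.inl h
        · exact Or.inl hxmem
        · exact Or.inr h

-- two strictly increasing lists with the same members are equal
theorem eq_of_pairwise_lt_of_mem_iff (l1 l2 : List Int)
    (h1 : l1.Pairwise (· < ·)) (h2 : l2.Pairwise (· < ·))
    (hm : ∀ y, y ∈ l1 ↔ y ∈ l2) : l1 = l2 := by
  have hn1 : l1.Nodup := h1.imp (fun h => ne_of_lt h)
  have hn2 : l2.Nodup := h2.imp (fun h => ne_of_lt h)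
  have hperm : l1.Perm l2 := (List.perm_ext_iff_of_nodup hn1 hn2).mpr hm
  exact hperm.eq_of_sorted (fun a b _ _ hab hba => le_antisymm hab hba)
    (h1.imp le_of_lt) (h2.imp le_of_lt)

-- ===== VERDICT (by name: the statement is the Claim_ definition above) =====
theorem dedup_list_sort_spec : Claim_equal_dedup_list_sort := by
  intro v e d _ _
  unfold Spec_dedup_list_sort dedup_list_sort dedup_list_sort_alt
  set xs := (PySem.List.pyRange e d 1).map (fun i => PySem.List.pyGetD v i 0) with hxs
  have hA : (PySem.List.pyRange e d 1).foldl (fun lst i => aStep lst (PySem.List.pyGetD v i 0)) [] = xs.foldl aStep [] := by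
    rw [hxs, List.foldl_map]
  rw [hA]
  set tmp := PySem.List.sorted xs (fun x => x) with htmp
  obtain ⟨hpa, hma⟩ := foldl_aStep_invariant xs [] (by simp)
  have htsort : tmp.Pairwise (· ≤ ·) := PySem.List.sorted_pairwise xs (fun x => x)
  obtain ⟨hpb, hmb⟩ := foldl_bStep_invariant tmp [] (by simp) (by simp) htsort
  apply eq_of_pairwise_lt_of_mem_iff _ _ hpa hpb
  intro y
  rw [hma y, hmb y]
  have : y ∈ tmp ↔ y ∈ xs := PySem.List.mem_sorted xs (fun x => x) false y
  simp [this]
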